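-- pv_equiv track=rewrite | github.com/Ogkagho/python-Learning | MIT_CompSci_Course/problem_set_3/Mit_ps3_2008/ps3d.py | subStringMatchExactlyOneSub
-- ===== SOURCE A (Python) =====
-- def subStringMatchExact(targString, keyString):
--     points = ()
--     s = 0   #initial start 0
--     while s != -1:  #ensures loop terminates if s is larger than targetstring
--         s = targString.find(keyString, s) #finds index of substring occurrence
--         points += (s,)
--         if s == -1:
--             points = points[0:-1]
--             return points
--         s += 1   #moves start to the next index, based on previous found index
--
-- def constrainedMatchPair(firstMatch, secondMatch, length):
--     tu = ()
--     for i in firstMatch: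
--         if i + length + 1 in secondMatch:
--             tu += (i,)
--     return tu
--
-- def subStringMatchExactlyOneSub(target,keyString):
--     allAnswers = ()
--     for i in range(len(keyString)):
--         keyString1 = keyString[:i]
--         keyString2 = keyString[i+1:]
--         start1 = subStringMatchExact(target, keyString1)
--         start2 = subStringMatchExact(target, keyString2)
--         filtered = constrainedMatchPair(start1, start2, len(keyString1))
--
--         allAnswers += filtered
--     return allAnswers
-- ===== SOURCE B (Python) =====
-- def subStringMatchExactlyOneSub(target, keyString):
--     res = ()
--     n, m = len(target), len(keyString)
--     for i in range(m):
--         for p in range(n - m + 1):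
--             if target[p:p+i] == keyString[:i] and target[p+i+1:p+m] == keyString[i+1:]:
--                 res += (p,)
--     return res
-- ===== Notes on version B (the rewrite author's own statement) =====
-- stated objective: simpler
-- what changed: Instead of building two lists of find()-occurrence indices for keyString[:i] and keyString[i+1:] and pairing them with an inner 'p+len(key1)+1 in secondMatch' membership scan, B slides one window position p over range(len(target)-len(keyString)+1) and emits p whenever the two slices around the substituted character match directly, eliminating the per-element scan of the second index list.
import Mathlib
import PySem

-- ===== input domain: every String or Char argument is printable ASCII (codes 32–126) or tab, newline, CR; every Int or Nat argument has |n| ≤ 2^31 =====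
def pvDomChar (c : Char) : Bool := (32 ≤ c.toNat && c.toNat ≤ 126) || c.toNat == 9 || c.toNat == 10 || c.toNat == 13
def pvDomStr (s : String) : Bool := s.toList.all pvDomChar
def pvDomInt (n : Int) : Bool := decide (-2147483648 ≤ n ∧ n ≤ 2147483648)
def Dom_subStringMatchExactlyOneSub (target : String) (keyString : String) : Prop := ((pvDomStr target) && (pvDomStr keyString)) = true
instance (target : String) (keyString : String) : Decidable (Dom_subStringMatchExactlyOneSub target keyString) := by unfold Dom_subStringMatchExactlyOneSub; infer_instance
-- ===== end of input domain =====

-- B replaces A's build-two-find()-index-lists-then-pair-with-offset strategy by a single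
-- direct windowed slice comparison per split index (objective: simpler; same return value).

-- ===== PORT A =====
def pvExactLoop (targ key : List Char) : Nat → Nat → List Int → List Int
  | 0, _, points => points
  | fuel+1, s, points =>
      let f := PySem.Chars.findFrom targ key (s : Int) none
      let points' := points ++ [f]
      if f = -1 then PySem.List.slice points' none (some (-1))   -- points[0:-1]
      else pvExactLoop targ key fuel (f.toNat + 1) points'

def pvSubStringMatchExact (targ key : List Char) : List Int :=
  pvExactLoop targ key (targ.length + 2) 0 []

def pvConstrainedMatchPair (firstMatch secondMatch : List Int) (length : Int) : List Int :=
  firstMatch.foldl (fun tu i => if (i + length + 1) ∈ secondMatch then tu ++ [i] else tu) []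

def subStringMatchExactlyOneSub (target : String) (keyString : String) : List Int :=
  let targ := target.toList
  let key := keyString.toList
  (PySem.List.pyRange 0 (key.length : Int) 1).foldl (fun allAnswers i =>
    let key1 := PySem.List.slice key none (some i)          -- keyString[:i]
    let key2 := PySem.List.slice key (some (i+1)) none      -- keyString[i+1:]
    let start1 := pvSubStringMatchExact targ key1
    let start2 := pvSubStringMatchExact targ key2
    let filtered := pvConstrainedMatchPair start1 start2 (key1.length : Int)
    allAnswers ++ filtered) []

-- ===== PORT B =====
def subStringMatchExactlyOneSub_alt (target : String) (keyString : String) : List Int :=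
  let t := target.toList
  let k := keyString.toList
  let n : Int := t.length
  let m : Int := k.length
  (PySem.List.pyRange 0 m 1).foldl (fun res i =>
    (PySem.List.pyRange 0 (n - m + 1) 1).foldl (fun res p =>
      if PySem.List.slice t (some p) (some (p+i)) = PySem.List.slice k none (some i) ∧
         PySem.List.slice t (some (p+i+1)) (some (p+m)) = PySem.List.slice k (some (i+1)) none
      then res ++ [p] else res) res) []

-- ===== PRECONDITION & SPEC =====
def Spec_subStringMatchExactlyOneSub (target : String) (keyString : String) (out : List Int) : Prop := out = subStringMatchExactlyOneSub_alt target keyString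
instance (target : String) (keyString : String) (out : List Int) : Decidable (Spec_subStringMatchExactlyOneSub target keyString out) := by unfold Spec_subStringMatchExactlyOneSub; infer_instance

-- ===== CLAIM (what is proved, stated in full; the proofs are below) =====
def Claim_equal_subStringMatchExactlyOneSub : Prop := ∀ (target : String) (keyString : String), Dom_subStringMatchExactlyOneSub target keyString → Spec_subStringMatchExactlyOneSub target keyString (subStringMatchExactlyOneSub target keyString)

-- ===== LEMMAS AND PROOFS =====

def pvOcc (targ key : List Char) (s : Nat) : List Int :=
  ((List.range' s (targ.length + 1 - s)).filter (fun p => decide (key <+: targ.drop p))).map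
    (fun p => Int.ofNat p)

theorem pvFindFrom_past (targ key : List Char) (s : Nat) (h : targ.length < s) :
    PySem.Chars.findFrom targ key (s : Int) none = -1 := by
  simp only [PySem.Chars.findFrom]
  rw [if_pos (by exact_mod_cast h)]

theorem pvExactLoop_eq (targ key : List Char) :
    ∀ (fuel s : Nat) (points : List Int), s ≤ targ.length + 1 → targ.length + 2 ≤ fuel + s →
    pvExactLoop targ key fuel s points = points ++ pvOcc targ key s := by
  intro fuel
  induction fuel with
  | zero => intro s points hs hf; omega
  | succ fuel ih =>
    intro s points hs hf
    by_cases hlen : s ≤ targ.length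
    · have hcast := PySem.Chars.findFrom_natCast targ key s hlen
      by_cases hfind : PySem.Chars.find (targ.drop s) key = -1
      · have hninf : ¬ key <:+: targ.drop s := (PySem.Chars.find_eq_neg_one_iff _ _).1 hfind
        have hfil : (List.range' s (targ.length + 1 - s)).filter
            (fun p => decide (key <+: targ.drop p)) = [] := by
          rw [List.filter_eq_nil_iff]
          intro p hp
          simp only [List.mem_range'_1] at hp
          simp only [decide_eq_true_eq]
          intro hpre
          have hdd : targ.drop p = (targ.drop s).drop (p - s) := by
            rw [List.drop_drop]; congr 1; omega
          exact hninf ((hdd ▸ hpre).isInfix.trans (List.drop_suffix _ _).isInfix)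
        have hocc : pvOcc targ key s = [] := by unfold pvOcc; rw [hfil]; rfl
        simp only [pvExactLoop, hcast, if_pos hfind, hocc, List.append_nil,
          PySem.List.slice_to_neg_one, List.dropLast_concat, if_true]
      · set j := PySem.Chars.find (targ.drop s) key with hj
        have hj0 : 0 ≤ j := by have := PySem.Chars.neg_one_le_find (targ.drop s) key; omega
        have hjlen : j ≤ ((targ.drop s).length : Int) := PySem.Chars.find_le_length _ _
        have hspec := PySem.Chars.find_spec (s := targ.drop s) (sub := key) hj0
        have hjn : j.toNat ≤ targ.length - s := by
          simp only [List.length_drop] at hjlen; omega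
        have hne : ¬ ((s : Int) + j = -1) := by omega
        have htn : ((s : Int) + j).toNat = s + j.toNat := by omega
        have step : pvExactLoop targ key (fuel+1) s points
            = pvExactLoop targ key fuel (s + j.toNat + 1) (points ++ [(s : Int) + j]) := by
          simp only [pvExactLoop, hcast, if_neg hfind, if_neg hne, htn]
        rw [step, ih _ _ (by omega) (by omega)]
        have hsplit : pvOcc targ key s = ((s : Int) + j) :: pvOcc targ key (s + j.toNat + 1) := by
          have h1 : List.range' s (targ.length + 1 - s)
              = List.range' s j.toNat ++ List.range' (s + j.toNat) (targ.length + 1 - (s + j.toNat)) := by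
            have := List.range'_append (s := s) (m := j.toNat)
              (n := targ.length + 1 - (s + j.toNat)) (step := 1)
            simp only [one_mul] at this
            rw [show targ.length + 1 - s = j.toNat + (targ.length + 1 - (s + j.toNat)) by omega]
            exact this.symm
          have h2 : (List.range' s j.toNat).filter (fun p => decide (key <+: targ.drop p)) = [] := by
            rw [List.filter_eq_nil_iff]
            intro p hp
            simp only [List.mem_range'_1] at hp
            simp only [decide_eq_true_eq]
            intro hpre
            have hdd : targ.drop p = (targ.drop s).drop (p - s) := by
              rw [List.drop_drop]; congr 1; omega
            exact hspec.2 (p - s) (by omega) (hdd ▸ hpre)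
          have h3 : List.range' (s + j.toNat) (targ.length + 1 - (s + j.toNat))
              = (s + j.toNat) :: List.range' (s + j.toNat + 1) (targ.length + 1 - (s + j.toNat + 1)) := by
            rw [show targ.length + 1 - (s + j.toNat) = (targ.length + 1 - (s + j.toNat + 1)) + 1 by omega]
            exact List.range'_succ
          have h4 : key <+: targ.drop (s + j.toNat) := by
            have hdd : targ.drop (s + j.toNat) = (targ.drop s).drop j.toNat := by
              rw [List.drop_drop]
            rw [hdd]; exact hspec.1
          unfold pvOcc
          rw [h1, List.filter_append, h2, List.nil_append, h3]
          rw [List.filter_cons, if_pos (by simpa using h4), List.map_cons]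
          congr 1
          simp only [Int.ofNat_eq_natCast]
          omega
        rw [hsplit]
        simp
    · have hocc : pvOcc targ key s = [] := by
        unfold pvOcc
        rw [show targ.length + 1 - s = 0 by omega]
        rfl
      simp only [pvExactLoop, pvFindFrom_past targ key s (by omega), hocc,
        List.append_nil, PySem.List.slice_to_neg_one, List.dropLast_concat, if_true]

theorem pvSubStringMatchExact_eq (targ key : List Char) :
    pvSubStringMatchExact targ key = pvOcc targ key 0 := by
  unfold pvSubStringMatchExact
  rw [pvExactLoop_eq targ key _ 0 [] (by omega) (by omega)]
  simp

theorem pvCMP_eq (first second : List Int) (L : Int) :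
    pvConstrainedMatchPair first second L
      = first.filter (fun x => decide ((x + L + 1) ∈ second)) := by
  unfold pvConstrainedMatchPair
  rw [show (fun (tu : List Int) (i : Int) => if (i + L + 1) ∈ second then tu ++ [i] else tu)
      = (fun tu i => if (decide ((i + L + 1) ∈ second)) = true then tu ++ [(fun x : Int => x) i] else tu) by
    funext tu i; simp]
  rw [PySem.List.foldl_append_if]
  simp

theorem pvMem_occ (t key2 : List Char) (q : Nat) :
    (Int.ofNat q ∈ pvOcc t key2 0) ↔ (q ≤ t.length ∧ key2 <+: t.drop q) := by
  unfold pvOcc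
  simp only [List.mem_map, List.mem_filter, List.mem_range'_1, Int.ofNat_eq_natCast,
    Nat.cast_inj, decide_eq_true_eq]
  constructor
  · rintro ⟨a, ⟨⟨_, ha⟩, hpre⟩, rfl⟩; exact ⟨by omega, hpre⟩
  · rintro ⟨hq, hpre⟩; exact ⟨q, ⟨⟨by omega, by omega⟩, hpre⟩, rfl⟩

theorem pvFilter_occ (t key : List Char) (p : Int → Bool) :
    (pvOcc t key 0).filter p
      = ((List.range (t.length + 1)).filter
          (fun a => p (Int.ofNat a) && decide (key <+: t.drop a))).map Int.ofNat := by
  unfold pvOcc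
  rw [List.filter_map, List.filter_filter, Nat.sub_zero, ← List.range_eq_range']
  rfl

theorem pvNatFilter_eq (t k : List Char) (iN : Nat) (hi : iN < k.length) :
    (List.range (t.length + 1)).filter
        (fun p => decide ((Int.ofNat p + Int.ofNat iN + 1) ∈ pvOcc t (k.drop (iN + 1)) 0) &&
                  decide (k.take iN <+: t.drop p))
      = (List.range (t.length + 1 - k.length)).filter
        (fun p => decide ((t.drop p).take iN = k.take iN) &&
                  decide ((t.drop (p + iN + 1)).take (k.length - (iN + 1)) = k.drop (iN + 1))) := by
  have hl1 : (k.take iN).length = iN := by rw [List.length_take]; omega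
  have hl2 : (k.drop (iN + 1)).length = k.length - (iN + 1) := List.length_drop
  have hmem : ∀ p : Nat, (((p : Int) + (iN : Int) + 1) ∈ pvOcc t (k.drop (iN + 1)) 0)
      ↔ (p + iN + 1 ≤ t.length ∧ k.drop (iN + 1) <+: t.drop (p + iN + 1)) := by
    intro p
    rw [show ((p : Int) + (iN : Int) + 1) = Int.ofNat (p + iN + 1) by
      simp only [Int.ofNat_eq_natCast]; push_cast; ring]
    exact pvMem_occ t (k.drop (iN + 1)) (p + iN + 1)
  have hsplit : List.range (t.length + 1)
      = List.range (t.length + 1 - k.length)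
        ++ List.range' (t.length + 1 - k.length) ((t.length + 1) - (t.length + 1 - k.length)) := by
    have h := List.range'_append (s := 0) (m := t.length + 1 - k.length)
      (n := (t.length + 1) - (t.length + 1 - k.length)) (step := 1)
    simp only [one_mul, Nat.zero_add] at h
    rw [List.range_eq_range', List.range_eq_range', h]
    congr 1
    omega
  rw [hsplit, List.filter_append]
  have h2 : (List.range' (t.length + 1 - k.length) ((t.length + 1) - (t.length + 1 - k.length))).filter
      (fun p => decide ((Int.ofNat p + Int.ofNat iN + 1) ∈ pvOcc t (k.drop (iN + 1)) 0) &&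
                decide (k.take iN <+: t.drop p)) = [] := by
    rw [List.filter_eq_nil_iff]
    intro p hp
    simp only [List.mem_range'_1] at hp
    simp only [Bool.and_eq_true, decide_eq_true_eq, Int.ofNat_eq_natCast, hmem p, not_and]
    rintro ⟨hle, hpref2⟩ _
    have := hpref2.length_le
    rw [hl2, List.length_drop] at this
    omega
  rw [h2, List.append_nil]
  apply List.filter_congr
  intro p hp
  have hp' := List.mem_range.mp hp
  have c1 : (k.take iN <+: t.drop p) ↔ ((t.drop p).take iN = k.take iN) := by
    rw [List.prefix_iff_eq_take, hl1, eq_comm]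
  have c2 : (k.drop (iN + 1) <+: t.drop (p + iN + 1))
      ↔ ((t.drop (p + iN + 1)).take (k.length - (iN + 1)) = k.drop (iN + 1)) := by
    rw [List.prefix_iff_eq_take, hl2, eq_comm]
  have c3 : p + iN + 1 ≤ t.length := by omega
  simp [Int.ofNat_eq_natCast, hmem p, c1, c2, c3, Bool.and_comm]

theorem pvPerIndex_eq (t k : List Char) (iN : Nat) (hi : iN < k.length) :
    pvConstrainedMatchPair (pvSubStringMatchExact t (k.take iN))
        (pvSubStringMatchExact t (k.drop (iN + 1))) (Int.ofNat iN)
      = ((List.range (t.length + 1 - k.length)).filter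
          (fun p => decide ((t.drop p).take iN = k.take iN) &&
                    decide ((t.drop (p + iN + 1)).take (k.length - (iN + 1)) = k.drop (iN + 1)))).map
          Int.ofNat := by
  rw [pvCMP_eq, pvSubStringMatchExact_eq t (k.take iN), pvSubStringMatchExact_eq t (k.drop (iN + 1))]
  rw [pvFilter_occ]
  rw [← pvNatFilter_eq t k iN hi]

theorem pvPyRangeZero_toNat (b : Int) :
    PySem.List.pyRange 0 b 1 = (List.range b.toNat).map (fun q => Int.ofNat q) := by
  rcases (show 0 ≤ b ∨ b < 0 by omega) with hb | hb
  · obtain ⟨nb, rfl⟩ := Int.eq_ofNat_of_zero_le hb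
    rw [Int.toNat_natCast]
    simpa [Int.ofNat_eq_natCast] using PySem.List.pyRange_zero_natCast nb
  · rw [show b.toNat = 0 by omega]
    have he : PySem.List.pyRange 0 b 1 = [] := by
      rw [List.eq_nil_iff_forall_not_mem]
      intro x hx
      rw [PySem.List.mem_pyRange_one] at hx
      omega
    simp [he]

theorem pvA_eq (target keyString : String) :
    subStringMatchExactlyOneSub target keyString
      = (List.range keyString.toList.length).flatMap (fun iN =>
          pvConstrainedMatchPair (pvSubStringMatchExact target.toList (keyString.toList.take iN))
            (pvSubStringMatchExact target.toList (keyString.toList.drop (iN + 1))) (Int.ofNat iN)) := by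
  simp only [subStringMatchExactlyOneSub]
  rw [PySem.List.pyRange_zero_natCast, List.foldl_map]
  refine ((PySem.List.foldl_congr_mem _ _
      (fun acc iN => acc ++ pvConstrainedMatchPair
          (pvSubStringMatchExact target.toList (keyString.toList.take iN))
          (pvSubStringMatchExact target.toList (keyString.toList.drop (iN + 1))) (Int.ofNat iN)) [] ?_).trans
    ((PySem.List.foldl_append_eq_flatMap _ _ _).trans (List.nil_append _)))
  intro acc iN hiN
  have hi : iN < keyString.toList.length := List.mem_range.mp hiN
  have e1 : PySem.List.slice keyString.toList none (some (iN : Int)) = keyString.toList.take iN :=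
    PySem.List.slice_to_natCast _ _
  have e2 : PySem.List.slice keyString.toList (some ((iN : Int) + 1)) none = keyString.toList.drop (iN + 1) := by
    rw [show ((iN : Int) + 1) = ((iN + 1 : Nat) : Int) by push_cast; ring]
    exact PySem.List.slice_from_natCast _ _
  have e3 : ((keyString.toList.take iN).length : Int) = Int.ofNat iN := by
    rw [List.length_take]
    simp only [Int.ofNat_eq_natCast, Nat.cast_inj]
    omega
  simp only [e1, e2, e3]

theorem pvB_eq (target keyString : String) :
    subStringMatchExactlyOneSub_alt target keyString
      = (List.range keyString.toList.length).flatMap (fun iN =>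
          ((List.range (target.toList.length + 1 - keyString.toList.length)).filter
            (fun p => decide ((target.toList.drop p).take iN = keyString.toList.take iN) &&
                      decide ((target.toList.drop (p + iN + 1)).take
                          (keyString.toList.length - (iN + 1)) = keyString.toList.drop (iN + 1)))).map
            Int.ofNat) := by
  simp only [subStringMatchExactlyOneSub_alt]
  rw [PySem.List.pyRange_zero_natCast, List.foldl_map]
  refine ((PySem.List.foldl_congr_mem _ _ (fun res iN =>
      res ++ ((List.range (target.toList.length + 1 - keyString.toList.length)).filter
            (fun p => decide ((target.toList.drop p).take iN = keyString.toList.take iN) &&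
                      decide ((target.toList.drop (p + iN + 1)).take
                          (keyString.toList.length - (iN + 1)) = keyString.toList.drop (iN + 1)))).map
            Int.ofNat) [] ?_).trans
    ((PySem.List.foldl_append_eq_flatMap _ _ _).trans (List.nil_append _)))
  intro res iN hiN
  have hi : iN < keyString.toList.length := List.mem_range.mp hiN
  rw [pvPyRangeZero_toNat, List.foldl_map]
  rw [show ((target.toList.length : Int) - (keyString.toList.length : Int) + 1).toNat
      = target.toList.length + 1 - keyString.toList.length by omega]
  refine ((PySem.List.foldl_congr_mem _ _ (fun res q =>
      if ((decide ((target.toList.drop q).take iN = keyString.toList.take iN) &&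
           decide ((target.toList.drop (q + iN + 1)).take
              (keyString.toList.length - (iN + 1)) = keyString.toList.drop (iN + 1)))) = true
      then res ++ [Int.ofNat q] else res) res ?_).trans
    (PySem.List.foldl_append_if _ _ _ _))
  intro res' q hq
  simp only [Int.ofNat_eq_natCast]
  have e1 : PySem.List.slice target.toList (some (q : Int)) (some ((q : Int) + (iN : Int)))
      = (target.toList.drop q).take iN := by
    rw [show ((q : Int) + (iN : Int)) = ((q + iN : Nat) : Int) by push_cast; ring,
       PySem.List.slice_natCast]
    congr 1
    omega
  have e2 : PySem.List.slice target.toList (some ((q : Int) + (iN : Int) + 1))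
        (some ((q : Int) + (keyString.toList.length : Int)))
      = (target.toList.drop (q + iN + 1)).take (keyString.toList.length - (iN + 1)) := by
    rw [show ((q : Int) + (iN : Int) + 1) = ((q + iN + 1 : Nat) : Int) by push_cast; ring,
       show ((q : Int) + (keyString.toList.length : Int)) = ((q + keyString.toList.length : Nat) : Int) by
         push_cast; ring,
       PySem.List.slice_natCast]
    congr 1
    omega
  have e3 : PySem.List.slice keyString.toList none (some (iN : Int)) = keyString.toList.take iN :=
    PySem.List.slice_to_natCast _ _
  have e4 : PySem.List.slice keyString.toList (some ((iN : Int) + 1)) none = keyString.toList.drop (iN + 1) := by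
    rw [show ((iN : Int) + 1) = ((iN + 1 : Nat) : Int) by push_cast; ring]
    exact PySem.List.slice_from_natCast _ _
  rw [e1, e2, e3, e4]
  by_cases h : ((target.toList.drop q).take iN = keyString.toList.take iN ∧
      (target.toList.drop (q + iN + 1)).take (keyString.toList.length - (iN + 1))
        = keyString.toList.drop (iN + 1))
  · rw [if_pos h, if_pos (by simp only [Bool.and_eq_true, decide_eq_true_eq]; exact h)]
  · rw [if_neg h, if_neg (by simp only [Bool.and_eq_true, decide_eq_true_eq]; exact h)]

-- ===== VERDICT (by name: the statement is the Claim_ definition above) =====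
theorem subStringMatchExactlyOneSub_spec : Claim_equal_subStringMatchExactlyOneSub := by
  unfold Claim_equal_subStringMatchExactlyOneSub
  intro target keyString _
  unfold Spec_subStringMatchExactlyOneSub
  rw [pvA_eq, pvB_eq, List.flatMap_def, List.flatMap_def]
  congr 1
  apply List.map_congr_left
  intro iN hiN
  exact pvPerIndex_eq target.toList keyString.toList iN (List.mem_range.mp hiN)
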